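-- pv_equiv track=rewrite | github.com/dear-s/CSCI-561 | homework3.py | checkForContradiction
-- ===== SOURCE A (Python) =====
-- import collections
--
-- uppercaseArr = "ABCDEFGHIJKLMNOPQRSTUVWXYZ"
--
-- def findPredicate(sentence):
--     predicateMap = collections.OrderedDict()
--     i = 0
--     start = 0
--     while i != -1:
--         i = sentence.find('(')
--         if i != -1:
--             predicate = sentence[start:i]
--             sentence = sentence[i:]
--             closeIndex = sentence.find(')')
--             vars = sentence[1:closeIndex].split(",")
--             if predicate not in list(predicateMap.keys()):
--                 predicateMap[predicate] = [vars]
--             else: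
--                 v = predicateMap[predicate]
--                 v.append(vars)
--                 predicateMap[predicate] = v
--             i = sentence.find('|')
--             if i != -1:
--                 i += 1
--                 sentence = sentence[i:len(sentence)]
--     return predicateMap
--
-- def isConstant(str):
--     if uppercaseArr.find(str[0]) != -1:
--         return True
--     else:
--         return False
--
-- def checkForContradiction(newSentence, stdKb):
--     if newSentence.count("(") == 1 and newSentence.count(")") == 1:
--         negatedSentence = negateQuery(newSentence)
--         for sen in stdKb:
--             if sen == negatedSentence:
--                 newSentenceMap = collections.OrderedDict()
--                 newSentenceMap = findPredicate(newSentence)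
--                 oldSentenceMap = collections.OrderedDict()
--                 oldSentenceMap = findPredicate(sen)
--                 answer1 = True
--                 answer2 = True
--                 for k, v in list(newSentenceMap.items()):
--                     for val in v:
--                         for val1 in val:
--                             if not isConstant(val1):
--                                 answer1 = False
--                                 break
--                 for k, v in list(oldSentenceMap.items()):
--                     for val in v:
--                         for val1 in val:
--                             if not isConstant(val1):
--                                 answer2 = False
--                                 break
--                 return answer1 | answer2
--         return False
--     else:
--         return False
--
-- def negateQuery(query):
--     if query[0] == '~':
--         query = query[1:]
--     else:
--         query = '~' + query
--     return query
-- ===== SOURCE B (Python) =====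
-- def _allConstants(sentence):
--     inner = sentence[sentence.find('(') + 1 : sentence.find(')')]
--     return all(arg[0].isupper() for arg in inner.split(','))
--
-- def checkForContradiction(newSentence, stdKb):
--     if newSentence.count("(") != 1 or newSentence.count(")") != 1:
--         return False
--     negated = newSentence[1:] if newSentence.startswith('~') else '~' + newSentence
--     match = next((sen for sen in stdKb if sen == negated), None)
--     if match is None:
--         return False
--     return _allConstants(newSentence) or _allConstants(match)
-- ===== Notes on version B (the rewrite author's own statement) =====
-- stated objective: simpler
-- what changed: Replaces the OrderedDict built by findPredicate's while-loop and the triple-nested loops over its items with a direct slice of each sentence's argument string between '(' and ')' split on ',', tested with all(arg[0].isupper()); the KB scan becomes a single next() lookup.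
-- outside the precondition, e.g. on checkForContradiction('x)P(AB', ['~x)P(AB']): A returns True, B raises IndexError; on checkForContradiction('P(x,)', ['~P(x,)']): A returns False, B returns False
import Mathlib
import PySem

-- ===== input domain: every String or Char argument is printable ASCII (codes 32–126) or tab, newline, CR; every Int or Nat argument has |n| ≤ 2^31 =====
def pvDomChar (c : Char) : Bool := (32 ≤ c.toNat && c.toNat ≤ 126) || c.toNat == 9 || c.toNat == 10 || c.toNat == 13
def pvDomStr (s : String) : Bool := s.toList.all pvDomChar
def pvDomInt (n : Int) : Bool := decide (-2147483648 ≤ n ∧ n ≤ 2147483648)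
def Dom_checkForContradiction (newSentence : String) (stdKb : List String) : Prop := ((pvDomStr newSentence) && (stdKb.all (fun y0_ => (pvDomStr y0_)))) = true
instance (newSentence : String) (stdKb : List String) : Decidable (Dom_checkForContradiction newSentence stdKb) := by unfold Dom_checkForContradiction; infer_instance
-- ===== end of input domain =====

-- B replaces A's OrderedDict/findPredicate machinery and triple-nested loops by slicing each
-- sentence's argument substring between '(' and ')' and testing all(arg[0].isupper()) — simpler, same cost.

-- ===== PORT A =====

-- uppercaseArr = "ABCDEFGHIJKLMNOPQRSTUVWXYZ"
def uppercaseArrChars : List Char := "ABCDEFGHIJKLMNOPQRSTUVWXYZ".toList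

-- isConstant(str): uppercaseArr.find(str[0]) != -1; str[0] raises IndexError on "" (returns false here; excluded by Pre_)
def isConstantA (arg : List Char) : Bool :=
  match PySem.Chars.pyGet? arg 0 with
  | none => false
  | some c => PySem.Chars.find uppercaseArrChars [c] != -1

-- the while-loop of findPredicate; fuel = length+1 suffices since each iteration strictly shortens the sentence
def fpLoop : Nat → List Char → PySem.Dict (List Char) (List (List (List Char))) → PySem.Dict (List Char) (List (List (List Char)))
  | 0, _, m => m
  | fuel+1, s, m =>
    let i := PySem.Chars.find s ['(']
    if i = -1 then m
    else
      let predicate := PySem.List.slice s (some 0) (some i)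
      let s1 := PySem.List.slice s (some i) none
      let closeIndex := PySem.Chars.find s1 [')']
      let vars := PySem.Chars.splitOn (PySem.List.slice s1 (some 1) (some closeIndex)) [',']
      let m' := if (m.keys).contains predicate then
          -- v = predicateMap[predicate]; v.append(vars); predicateMap[predicate] = v  (key present, so get? is some)
          m.insert predicate (((m.get? predicate).getD []) ++ [vars])
        else m.insert predicate [vars]
      let j := PySem.Chars.find s1 ['|']
      if j = -1 then m'
      else fpLoop fuel (PySem.List.slice s1 (some (j+1)) (some (s1.length : Int))) m'

def findPredicateA (s : List Char) : PySem.Dict (List Char) (List (List (List Char))) :=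
  fpLoop (s.length + 1) s PySem.Dict.empty

-- inner 'for val1 in val' loop with its break
def innerLoopA : Bool → List (List Char) → Bool
  | a, [] => a
  | a, x :: r => if !isConstantA x then false else innerLoopA a r

-- the triple-nested 'for k, v / for val / for val1' loops computing answer1/answer2
def answersA (m : PySem.Dict (List Char) (List (List (List Char)))) : Bool :=
  (PySem.Dict.items m).foldl (fun a kv => kv.2.foldl (fun a val => innerLoopA a val) a) true

-- negateQuery
def negQA (q : List Char) : List Char :=
  if PySem.Chars.pyGet? q 0 == some '~' then PySem.List.slice q (some 1) none else '~' :: q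

-- the 'for sen in stdKb' loop
def scanA (neg : List Char) (ns : List Char) : List String → Bool
  | [] => false
  | sen :: rest =>
    if sen.toList == neg then
      answersA (findPredicateA ns) || answersA (findPredicateA sen.toList)
    else scanA neg ns rest

def checkForContradiction (newSentence : String) (stdKb : List String) : Bool :=
  let cs := newSentence.toList
  if (PySem.Chars.count cs ['('] == 1) && (PySem.Chars.count cs [')'] == 1) then
    scanA (negQA cs) cs stdKb
  else false

-- ===== PORT B =====

-- _allConstants: slice between '(' and ')', split on ',', all first chars uppercase (arg[0] on "" raises in Python; false here, excluded by Pre_)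
def allConstantsB (s : List Char) : Bool :=
  let inner := PySem.List.slice s (some (PySem.Chars.find s ['('] + 1)) (some (PySem.Chars.find s [')']))
  (PySem.Chars.splitOn inner [',']).all fun arg =>
    match PySem.Chars.pyGet? arg 0 with
    | none => false
    | some c => PySem.Chars.isupper c

def checkForContradiction_alt (newSentence : String) (stdKb : List String) : Bool :=
  let cs := newSentence.toList
  if !(PySem.Chars.count cs ['('] == 1) || !(PySem.Chars.count cs [')'] == 1) then false
  else
    let neg := if PySem.Chars.startswith cs ['~'] then PySem.List.slice cs (some 1) none else '~' :: cs
    match stdKb.find? (fun sen => sen.toList == neg) with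
    | none => false
    | some sen => allConstantsB cs || allConstantsB sen.toList

-- ===== PRECONDITION & SPEC =====

-- Pre_ excludes inputs where the guarded sentence matches the KB but is malformed: its '(' comes
-- after its ')' (A's value there is an accident of negative-slice parsing; B raises IndexError), or
-- some comma-separated argument between '(' and ')' is empty (Python A raises IndexError on such an
-- argument unless an earlier non-constant argument short-circuits the check).
def Pre_checkForContradiction (newSentence : String) (stdKb : List String) : Prop :=
  let cs := newSentence.toList
  (PySem.Chars.count cs ['('] = 1 ∧ PySem.Chars.count cs [')'] = 1 ∧
      (∃ sen ∈ stdKb, sen.toList = (if PySem.Chars.startswith cs ['~'] then cs.tail else '~' :: cs))) →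
    (PySem.Chars.find cs ['('] < PySem.Chars.find cs [')'] ∧
      ∀ arg ∈ PySem.Chars.splitOn
          (PySem.List.slice cs (some (PySem.Chars.find cs ['('] + 1)) (some (PySem.Chars.find cs [')']))) [','],
        arg ≠ [])
instance (newSentence : String) (stdKb : List String) : Decidable (Pre_checkForContradiction newSentence stdKb) := by
  unfold Pre_checkForContradiction; infer_instance

def pvWitness_checkForContradiction : String × List String := ("P(A)", ["~P(A)"])

def Spec_checkForContradiction (newSentence : String) (stdKb : List String) (out : Bool) : Prop := out = checkForContradiction_alt newSentence stdKb
instance (newSentence : String) (stdKb : List String) (out : Bool) : Decidable (Spec_checkForContradiction newSentence stdKb out) := by unfold Spec_checkForContradiction; infer_instance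

-- ===== CLAIM (what is proved, stated in full; the proofs are below) =====
def Claim_equal_checkForContradiction : Prop := ∀ (newSentence : String) (stdKb : List String), Dom_checkForContradiction newSentence stdKb → Pre_checkForContradiction newSentence stdKb → Spec_checkForContradiction newSentence stdKb (checkForContradiction newSentence stdKb)

-- ===== LEMMAS AND PROOFS =====

-- find on a singleton: absent and first-occurrence characterisations
theorem pv_find_not_mem (s : List Char) (c : Char) (h : c ∉ s) : PySem.Chars.find s [c] = -1 := by
  rw [PySem.Chars.find_eq_neg_one_iff]
  simpa [List.singleton_infix_iff] using h

theorem pv_go_append (c : Char) : ∀ (p : List Char) (r : List Char) (k : Nat), c ∉ p → PySem.Chars.find.go [c] (p ++ c :: r) k = (k + p.length : Int) := by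
  intro p
  induction p with
  | nil => intro r k _; simp [PySem.Chars.find.go, List.isPrefixOf]
  | cons h t ih => intro r k hm
                   simp at hm
                   simp [PySem.Chars.find.go, List.isPrefixOf, ih _ _ hm.2, hm.1]
                   push_cast; ring

theorem pv_find_append_cons (p r : List Char) (c : Char) (h : c ∉ p) :
    PySem.Chars.find (p ++ c :: r) [c] = (p.length : Int) := by
  simpa [PySem.Chars.find] using pv_go_append c p r 0 h

theorem pv_count_go (c : Char) : ∀ (s : List Char) (fuel acc : Nat), s.length ≤ fuel → PySem.Chars.count.go [c] fuel s acc = acc + s.count c := by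
  intro s
  induction s with
  | nil => intro fuel acc _; cases fuel <;> simp [PySem.Chars.count.go]
  | cons h t ih => intro fuel acc hf
                   cases fuel with
                   | zero => simp at hf
                   | succ f =>
                     simp at hf
                     by_cases hc : h = c
                     · simp [PySem.Chars.count.go, List.isPrefixOf, hc, ih _ _ hf, List.count_cons]
                       omega
                     · simp [PySem.Chars.count.go, List.isPrefixOf, Ne.symm hc, ih _ _ hf, List.count_cons, hc]

theorem pv_count_singleton (s : List Char) (c : Char) : PySem.Chars.count s [c] = s.count c := by
  simpa [PySem.Chars.count] using pv_count_go c s s.length 0 le_rfl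

theorem pv_count_one_decomp (s : List Char) (c : Char) (h : s.count c = 1) :
    ∃ p q, s = p ++ c :: q ∧ c ∉ p ∧ c ∉ q := by
  induction s with
  | nil => simp at h
  | cons x t ih =>
    by_cases hx : x = c
    · subst hx
      have ht : t.count x = 0 := by simp [List.count_cons] at h; omega
      exact ⟨[], t, rfl, by simp, by rwa [← List.count_eq_zero]⟩
    · have h' : t.count c = 1 := by
        rwa [List.count_cons_of_ne (show x ≠ c from hx)] at h
      obtain ⟨p, q, rfl, hp, hq⟩ := ih h'
      exact ⟨x :: p, q, rfl, by simp [hp]; exact fun e => hx e.symm, hq⟩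

-- A's membership test in uppercaseArr is Python's isupper
theorem pv_char_eq_iff (c d : Char) : c = d ↔ c.toNat = d.toNat :=
  ⟨fun e => by rw [e], fun e => Char.ext (UInt32.toNat_inj.mp e)⟩

theorem pv_isupper_iff (c : Char) : PySem.Chars.isupper c = true ↔ (65 ≤ c.toNat ∧ c.toNat ≤ 90) := by
  simp only [PySem.Chars.isupper, Bool.and_eq_true, decide_eq_true_eq, Char.le_def, UInt32.le_iff_toNat_le]
  norm_num [show ('A').val.toNat = 65 from rfl, show ('Z').val.toNat = 90 from rfl]

theorem pv_mem_ups (c : Char) : c ∈ uppercaseArrChars ↔ (65 ≤ c.toNat ∧ c.toNat ≤ 90) := by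
  have hl : uppercaseArrChars = ['A', 'B', 'C', 'D', 'E', 'F', 'G', 'H', 'I', 'J', 'K', 'L', 'M', 'N', 'O', 'P', 'Q', 'R', 'S', 'T', 'U', 'V', 'W', 'X', 'Y', 'Z'] := by decide
  rw [hl]
  simp only [List.mem_cons, List.not_mem_nil, or_false, pv_char_eq_iff, show ('A').toNat = 65 from rfl, show ('B').toNat = 66 from rfl, show ('C').toNat = 67 from rfl, show ('D').toNat = 68 from rfl, show ('E').toNat = 69 from rfl, show ('F').toNat = 70 from rfl, show ('G').toNat = 71 from rfl, show ('H').toNat = 72 from rfl, show ('I').toNat = 73 from rfl, show ('J').toNat = 74 from rfl, show ('K').toNat = 75 from rfl, show ('L').toNat = 76 from rfl, show ('M').toNat = 77 from rfl, show ('N').toNat = 78 from rfl, show ('O').toNat = 79 from rfl, show ('P').toNat = 80 from rfl, show ('Q').toNat = 81 from rfl, show ('R').toNat = 82 from rfl, show ('S').toNat = 83 from rfl, show ('T').toNat = 84 from rfl, show ('U').toNat = 85 from rfl, show ('V').toNat = 86 from rfl, show ('W').toNat = 87 from rfl, show ('X').toNat = 88 from rfl, show ('Y').toNat = 89 from rfl,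 show ('Z').toNat = 90 from rfl]
  omega

theorem pv_upper_char (c : Char) :
    (PySem.Chars.find uppercaseArrChars [c] != -1) = PySem.Chars.isupper c := by
  by_cases h : c ∈ uppercaseArrChars
  · have h1 : PySem.Chars.isupper c = true := (pv_isupper_iff c).mpr ((pv_mem_ups c).mp h)
    have h2 : 0 ≤ PySem.Chars.find uppercaseArrChars [c] := by
      rw [PySem.Chars.find_nonneg_iff]
      exact (List.singleton_infix_iff c uppercaseArrChars).mpr h
    rw [h1]
    have hne : PySem.Chars.find uppercaseArrChars [c] ≠ -1 := by omega
    simp [hne]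
  · have h1 : PySem.Chars.isupper c = false := by
      rw [← Bool.not_eq_true, pv_isupper_iff]
      rw [pv_mem_ups] at h
      omega
    have h2 : PySem.Chars.find uppercaseArrChars [c] = -1 := by
      rw [PySem.Chars.find_eq_neg_one_iff]
      simpa [List.singleton_infix_iff] using h
    rw [h1, h2]
    decide

theorem pv_isConstant_eq (arg : List Char) :
    isConstantA arg = (match PySem.Chars.pyGet? arg 0 with
      | none => false
      | some c => PySem.Chars.isupper c) := by
  cases arg with
  | nil => simp [isConstantA, PySem.Chars.pyGet?, PySem.List.pyGet?, PySem.List.pyIdx?]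
  | cons c r =>
    have h : PySem.Chars.pyGet? (c :: r) 0 = some c := by
      simp [PySem.Chars.pyGet?, PySem.List.pyGet?, PySem.List.pyIdx?]
    rw [isConstantA, h]
    exact pv_upper_char c

theorem pv_inner_all (l : List (List Char)) : innerLoopA true l = l.all isConstantA := by
  induction l with
  | nil => rfl
  | cons x r ih => cases hx : isConstantA x <;> simp [innerLoopA, hx, ih]

theorem pv_neg_eq (cs : List Char) :
    negQA cs = (if PySem.Chars.startswith cs ['~'] then PySem.List.slice cs (some 1) none else '~' :: cs) := by
  cases cs with
  | nil => simp [negQA, PySem.Chars.startswith, PySem.Chars.pyGet?, PySem.List.pyGet?, PySem.List.pyIdx?, List.isPrefixOf]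
  | cons h t =>
    have hg : PySem.Chars.pyGet? (h :: t) 0 = some h := by
      simp [PySem.Chars.pyGet?, PySem.List.pyGet?, PySem.List.pyIdx?]
    by_cases hh : h = '~'
    · simp [negQA, hg, PySem.Chars.startswith, List.isPrefixOf, hh]
    · simp only [negQA, hg, PySem.Chars.startswith, List.isPrefixOf, hh]
      simp only [List.isPrefixOf, Bool.and_eq_true, beq_iff_eq, if_neg]
      simp [hh]
      exact fun e => absurd e.symm hh

theorem pv_scan_eq (neg ns : List Char) (kb : List String) :
    scanA neg ns kb = (match kb.find? (fun sen => sen.toList == neg) with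
      | none => false
      | some sen => answersA (findPredicateA ns) || answersA (findPredicateA sen.toList)) := by
  induction kb with
  | nil => rfl
  | cons sen rest ih =>
    by_cases h : sen.toList = neg <;>
      simp [scanA, List.find?_cons, beq_iff_eq, h, ih]

theorem pv_fpLoop_succ (fuel : Nat) (s : List Char) (m : PySem.Dict (List Char) (List (List (List Char)))) :
    fpLoop (fuel+1) s m =
      (let i := PySem.Chars.find s ['(']
       if i = -1 then m
       else
         let predicate := PySem.List.slice s (some 0) (some i)
         let s1 := PySem.List.slice s (some i) none
         let closeIndex := PySem.Chars.find s1 [')']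
         let vars := PySem.Chars.splitOn (PySem.List.slice s1 (some 1) (some closeIndex)) [',']
         let m' := if (m.keys).contains predicate then
             m.insert predicate (((m.get? predicate).getD []) ++ [vars])
           else m.insert predicate [vars]
         let j := PySem.Chars.find s1 ['|']
         if j = -1 then m'
         else fpLoop fuel (PySem.List.slice s1 (some (j+1)) (some (s1.length : Int))) m') := rfl

theorem pv_fpLoop_stop (fuel : Nat) (s : List Char) (m : PySem.Dict (List Char) (List (List (List Char))))
    (h : PySem.Chars.find s ['('] = -1) : fpLoop fuel s m = m := by
  cases fuel with
  | zero => rfl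
  | succ f => rw [pv_fpLoop_succ]; simp [h]

-- the key lemma: on a sentence with a unique '(' before a unique ')', A's dict-and-loops answer
-- equals B's direct slice-and-all answer
theorem pv_key (pre mid post : List Char)
    (hp1 : '(' ∉ pre) (hp2 : ')' ∉ pre) (hm1 : '(' ∉ mid) (hm2 : ')' ∉ mid)
    (ht1 : '(' ∉ post) (ht2 : ')' ∉ post) :
    answersA (findPredicateA (pre ++ '(' :: (mid ++ ')' :: post))) =
      allConstantsB (pre ++ '(' :: (mid ++ ')' :: post)) := by
  have hne : ('(' : Char) ≠ ')' := by decide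
  set s : List Char := pre ++ '(' :: (mid ++ ')' :: post) with hs
  have hassoc : s = (pre ++ '(' :: mid) ++ ')' :: post := by simp [hs]
  have hfo : PySem.Chars.find s ['('] = (pre.length : Int) := pv_find_append_cons pre _ '(' hp1
  have hfc : PySem.Chars.find s [')'] = ((pre ++ '(' :: mid).length : Int) := by
    rw [hassoc]
    exact pv_find_append_cons _ _ ')' (by simp [hp2, hm2])
  have hs1 : PySem.List.slice s (some (pre.length : Int)) none = '(' :: (mid ++ ')' :: post) := by
    rw [PySem.List.slice_from_natCast, hs, List.drop_left]
  have hclose : PySem.Chars.find ('(' :: (mid ++ ')' :: post)) [')'] = ((mid.length + 1 : Nat) : Int) := by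
    have := pv_find_append_cons ('(' :: mid) post ')' (by simp [hm2])
    simpa [Nat.add_comm] using this
  have hvars : PySem.List.slice ('(' :: (mid ++ ')' :: post)) (some 1) (some ((mid.length + 1 : Nat) : Int)) = mid := by
    have h1 : ((1 : Nat) : Int) = (1 : Int) := by norm_num
    rw [← h1, PySem.List.slice_natCast]
    simp
  -- the dictionary built by the loop body
  have hdict : findPredicateA s =
      PySem.Dict.mk [(PySem.List.slice s (some 0) (some (pre.length : Int)),
        [PySem.Chars.splitOn mid [',']])] := by
    rw [findPredicateA, pv_fpLoop_succ]
    simp only [hfo]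
    rw [if_neg (by omega)]
    simp only [hs1, hclose, hvars]
    have hkeys : (PySem.Dict.empty (κ := List Char) (ν := List (List (List Char)))).keys.contains
        (PySem.List.slice s (some 0) (some (pre.length : Int))) = false := rfl
    simp only [hkeys, Bool.false_eq_true, if_false]
    have hins : (PySem.Dict.empty (κ := List Char) (ν := List (List (List Char)))).insert
        (PySem.List.slice s (some 0) (some (pre.length : Int))) [PySem.Chars.splitOn mid [',']] =
        PySem.Dict.mk [(PySem.List.slice s (some 0) (some (pre.length : Int)), [PySem.Chars.splitOn mid [',']])] := rfl
    rw [hins]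
    by_cases hj : PySem.Chars.find ('(' :: (mid ++ ')' :: post)) ['|'] = -1
    · rw [if_pos hj]
    · rw [if_neg hj]
      -- the remainder after '|' contains no '(': the loop's next find gives -1
      have hj0 : 0 ≤ PySem.Chars.find ('(' :: (mid ++ ')' :: post)) ['|'] := by
        apply (PySem.Chars.find_nonneg_iff ('(' :: (mid ++ ')' :: post)) ['|']).mpr
        by_contra hc
        exact hj ((PySem.Chars.find_eq_neg_one_iff _ _).mpr hc)
      obtain ⟨jn, hjn⟩ := Int.eq_ofNat_of_zero_le hj0
      apply pv_fpLoop_stop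
      apply pv_find_not_mem
      intro hmem
      have hsub : PySem.List.slice ('(' :: (mid ++ ')' :: post))
          (some (PySem.Chars.find ('(' :: (mid ++ ')' :: post)) ['|'] + 1))
          (some (('(' :: (mid ++ ')' :: post)).length : Int)) = List.drop jn (mid ++ ')' :: post) := by
        rw [hjn]
        have h2 : ((jn : Int) + 1) = ((jn + 1 : Nat) : Int) := by push_cast; ring
        rw [h2, PySem.List.slice_natCast]
        rw [List.take_of_length_le (by simp)]
        rfl
      rw [hsub] at hmem
      have : ('(' : Char) ∈ mid ++ ')' :: post := List.drop_subset _ _ hmem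
      simp [hm1, ht1, hne] at this
  rw [hdict]
  -- A's triple loop over the single-entry dict is an 'all' over the argument list
  have hans : answersA (PySem.Dict.mk [(PySem.List.slice s (some 0) (some (pre.length : Int)),
      [PySem.Chars.splitOn mid [',']])]) = (PySem.Chars.splitOn mid [',']).all isConstantA := by
    simp [answersA, PySem.Dict.items, pv_inner_all]
  rw [hans]
  -- B's direct slice is the same argument list
  have hinner : PySem.List.slice s (some (PySem.Chars.find s ['('] + 1)) (some (PySem.Chars.find s [')'])) = mid := by
    rw [hfo, hfc]
    have h1 : ((pre.length : Int) + 1) = ((pre.length + 1 : Nat) : Int) := by push_cast; ring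
    have h2 : (((pre ++ '(' :: mid).length : Nat) : Int) = ((pre.length + 1 + mid.length : Nat) : Int) := by
      simp; push_cast; ring
    rw [h1, h2, PySem.List.slice_natCast]
    have h3 : List.drop (pre.length + 1) s = mid ++ ')' :: post := by
      rw [hs, ← List.drop_drop]
      rw [List.drop_left]
      rfl
    rw [h3]
    simp
  rw [allConstantsB, hinner]
  congr 1
  exact funext pv_isConstant_eq

theorem pv_slice_one_tail (cs : List Char) : PySem.List.slice cs (some 1) none = cs.tail := by
  have h1 : ((1 : Nat) : Int) = (1 : Int) := by norm_num
  rw [← h1, PySem.List.slice_from_natCast, List.drop_one]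

-- uniqueness plus order yields the pre/mid/post decomposition around '(' and ')'
theorem pv_main_decomp (cs : List Char)
    (h1 : PySem.Chars.count cs ['('] = 1) (h2 : PySem.Chars.count cs [')'] = 1)
    (hord : PySem.Chars.find cs ['('] < PySem.Chars.find cs [')']) :
    ∃ p m t, cs = p ++ '(' :: (m ++ ')' :: t) ∧ '(' ∉ p ∧ ')' ∉ p ∧ '(' ∉ m ∧ ')' ∉ m ∧ '(' ∉ t ∧ ')' ∉ t := by
  have hc1 : cs.count '(' = 1 := by rw [← pv_count_singleton]; exact h1
  obtain ⟨p, q, rfl, hpP, hqP⟩ := pv_count_one_decomp cs '(' hc1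
  have hc2 : (p ++ '(' :: q).count ')' = 1 := by rw [← pv_count_singleton]; exact h2
  have hsplit : p.count ')' + q.count ')' = 1 := by
    simpa [List.count_append, List.count_cons] using hc2
  have hfo : PySem.Chars.find (p ++ '(' :: q) ['('] = (p.length : Int) := pv_find_append_cons p q '(' hpP
  have hpc : ')' ∉ p := by
    intro hin
    have hcp : p.count ')' = 1 := by
      have := List.count_pos_iff.mpr hin
      omega
    obtain ⟨a, b, hp, haa, _⟩ := pv_count_one_decomp p ')' hcp
    have hfc : PySem.Chars.find (p ++ '(' :: q) [')'] = (a.length : Int) := by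
      rw [hp]
      have : (a ++ ')' :: b) ++ '(' :: q = a ++ ')' :: (b ++ '(' :: q) := by simp
      rw [this]
      exact pv_find_append_cons a _ ')' haa
    rw [hfo, hfc] at hord
    have : a.length < p.length := by rw [hp]; simp
    omega
  have hqc : q.count ')' = 1 := by
    have : p.count ')' = 0 := List.count_eq_zero.mpr hpc
    omega
  obtain ⟨m, t, hq, hm2, ht2⟩ := pv_count_one_decomp q ')' hqc
  subst hq
  have hm1 : '(' ∉ m := fun h => hqP (by simp [h])
  have ht1 : '(' ∉ t := fun h => hqP (by simp [h])
  exact ⟨p, m, t, rfl, hpP, hpc, hm1, hm2, ht1, ht2⟩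

-- ===== VERDICT (by name: the statement is the Claim_ definition above) =====
theorem checkForContradiction_spec : Claim_equal_checkForContradiction := by
  intro ns kb _hdom hpre
  show checkForContradiction ns kb = checkForContradiction_alt ns kb
  rw [checkForContradiction, checkForContradiction_alt]
  by_cases h1 : PySem.Chars.count ns.toList ['('] = 1
  · by_cases h2 : PySem.Chars.count ns.toList [')'] = 1
    · simp only [h1, h2]
      norm_num
      rw [pv_scan_eq, pv_neg_eq]
      cases hfind : kb.find? (fun sen => sen.toList ==
          (if PySem.Chars.startswith ns.toList ['~'] then PySem.List.slice ns.toList (some 1) none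
           else '~' :: ns.toList)) with
      | none => rfl
      | some sen =>
        have hsen_eq : sen.toList =
            (if PySem.Chars.startswith ns.toList ['~'] then PySem.List.slice ns.toList (some 1) none
             else '~' :: ns.toList) := by
          have := List.find?_some hfind
          simpa using this
        have hsen_mem : sen ∈ kb := List.mem_of_find?_eq_some hfind
        have hwf := hpre ⟨h1, h2, sen, hsen_mem, by rw [hsen_eq, pv_slice_one_tail]⟩
        obtain ⟨p, m, t, hdec, hp1, hp2, hm1, hm2, ht1, ht2⟩ :=
          pv_main_decomp ns.toList h1 h2 hwf.1
        have hA : answersA (findPredicateA ns.toList) = allConstantsB ns.toList := by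
          rw [hdec]; exact pv_key p m t hp1 hp2 hm1 hm2 ht1 ht2
        have hB : answersA (findPredicateA sen.toList) = allConstantsB sen.toList := by
          rw [hsen_eq]
          by_cases hsw : PySem.Chars.startswith ns.toList ['~']
          · rw [if_pos hsw, pv_slice_one_tail]
            -- ns starts with '~', so p is nonempty and the tail keeps the decomposition
            cases hps : p with
            | nil =>
              exfalso
              have : ns.toList.head? = some '(' := by rw [hdec, hps]; rfl
              have h' : ns.toList.head? = some '~' := by
                cases hns : ns.toList with
                | nil => rw [hns] at hsw; simp [PySem.Chars.startswith, List.isPrefixOf] at hsw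
                | cons c r =>
                  rw [hns] at hsw
                  simp [PySem.Chars.startswith, List.isPrefixOf] at hsw
                  simp [hns, hsw.symm]
              rw [this] at h'
              simp at h'
            | cons c p' =>
              rw [hps] at hdec hp1 hp2
              rw [hdec]
              simp only [List.cons_append, List.tail_cons]
              exact pv_key p' m t (fun h => hp1 (by simp [h])) (fun h => hp2 (by simp [h]))
                hm1 hm2 ht1 ht2
          · rw [if_neg hsw]
            rw [hdec]
            have : '~' :: (p ++ '(' :: (m ++ ')' :: t)) = ('~' :: p) ++ '(' :: (m ++ ')' :: t) := rfl
            rw [this]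
            exact pv_key ('~' :: p) m t
              (by simp [hp1]) (by simp [hp2]) hm1 hm2 ht1 ht2
        simp only [hA, hB]
    · simp [h2]
  · simp [h1]
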